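-- pv_equiv track=rewrite | github.com/coherentus/Algo_Ya.Practicum | sprint_1/final/B.combine_hands.py | score_count
-- ===== SOURCE A (Python) =====
-- def score_count(key_matrix: str, fingers: int) -> int:
--     fingers_all: int = fingers * 2
--     result: int = 0
--     temp_counts: dict = dict()
--
--     for char in key_matrix:
--         if char == '.':
--             continue
--
--         if char in temp_counts:
--             temp_counts[char] += 1
--         else:
--             temp_counts[char] = 1
--
--     for value in temp_counts.values():
--         if value <= fingers_all:
--             result += 1
--
--     return result
-- ===== SOURCE B (Python) =====
-- def score_count(key_matrix: str, fingers: int) -> int: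
--     chars = sorted(c for c in key_matrix if c != '.')
--     limit = fingers * 2
--     result = 0
--     i = 0
--     n = len(chars)
--     while i < n:
--         j = i
--         while j < n and chars[j] == chars[i]:
--             j += 1
--         if j - i <= limit:
--             result += 1
--         i = j
--     return result
-- ===== Notes on version B (the rewrite author's own statement) =====
-- stated objective: alternative
-- what changed: Replaces the dict-of-counts accumulation plus a values scan by sort-then-scan: filter out '.', sort the remaining characters, and count maximal runs of equal characters whose length is at most 2*fingers.
import Mathlib
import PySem

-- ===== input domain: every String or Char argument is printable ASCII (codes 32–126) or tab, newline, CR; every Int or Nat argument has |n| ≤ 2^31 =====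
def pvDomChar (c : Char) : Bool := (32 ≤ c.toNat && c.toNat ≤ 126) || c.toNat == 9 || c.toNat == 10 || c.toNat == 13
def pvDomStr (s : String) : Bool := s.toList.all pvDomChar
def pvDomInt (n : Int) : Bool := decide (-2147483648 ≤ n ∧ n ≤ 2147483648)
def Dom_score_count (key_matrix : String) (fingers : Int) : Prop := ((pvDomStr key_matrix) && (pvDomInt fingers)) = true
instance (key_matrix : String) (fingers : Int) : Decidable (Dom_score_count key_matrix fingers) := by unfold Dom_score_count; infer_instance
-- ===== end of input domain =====

-- B replaces A's dict-of-counts accumulation + values scan with sort-then-scan over runs of equal characters (alternative algorithm, same results).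


-- ===== PORT A =====
def score_count (key_matrix : String) (fingers : Int) : Int :=
  let fingers_all : Int := fingers * 2
  let temp_counts : PySem.Dict Char Int :=
    key_matrix.toList.foldl (fun d char =>
      if char == '.' then d
      else if d.contains char then d.modify char 0 (· + 1)
      else d.insert char 1) PySem.Dict.empty
  temp_counts.values.foldl (fun result value =>
    if value ≤ fingers_all then result + 1 else result) 0

-- ===== PORT B =====
-- the run-scanning while loop of Source B: count maximal runs of equal chars, +1 when the run length ≤ limit
def pvCountRuns (limit : Int) : List Char → Int
  | [] => 0
  | c :: rest =>
      (if ((1 + (rest.takeWhile (fun x => x == c)).length : Int)) ≤ limit then 1 else 0)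
        + pvCountRuns limit (rest.dropWhile (fun x => x == c))
termination_by l => l.length
decreasing_by
  simpa using Nat.lt_succ_of_le (rest.length_dropWhile_le (fun x => x == c))

def score_count_alt (key_matrix : String) (fingers : Int) : Int :=
  let chars := PySem.List.sorted (key_matrix.toList.filter (fun c => c != '.')) (fun c => c) false
  pvCountRuns (fingers * 2) chars

-- ===== PRECONDITION & SPEC =====
def Spec_score_count (key_matrix : String) (fingers : Int) (out : Int) : Prop := out = score_count_alt key_matrix fingers
instance (key_matrix : String) (fingers : Int) (out : Int) : Decidable (Spec_score_count key_matrix fingers out) := by unfold Spec_score_count; infer_instance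

-- ===== CLAIM (what is proved, stated in full; the proofs are below) =====
def Claim_equal_score_count : Prop := ∀ (key_matrix : String) (fingers : Int), Dom_score_count key_matrix fingers → Spec_score_count key_matrix fingers (score_count key_matrix fingers)

-- ===== LEMMAS AND PROOFS =====

-- A's accumulation loop is Counter over the '.'-filtered characters
theorem pv_fold_eq_counter (l : List Char) :
    l.foldl (fun d char =>
      if char == '.' then d
      else if d.contains char then d.modify char 0 (· + 1)
      else d.insert char 1) PySem.Dict.empty
    = PySem.Dict.counter (l.filter (fun c => c != '.')) := by
  rw [PySem.Dict.counter_eq_foldl]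
  suffices h : ∀ (d : PySem.Dict Char Int), l.foldl (fun d char =>
      if char == '.' then d
      else if d.contains char then d.modify char 0 (· + 1)
      else d.insert char 1) d
    = (l.filter (fun c => c != '.')).foldl (fun d x => d.modify x 0 (· + 1)) d from h _
  induction l with
  | nil => intro d; simp
  | cons c t ih =>
      intro d
      rw [List.foldl_cons]
      by_cases hc : c = '.'
      · rw [if_pos (by simp [hc] : (c == '.') = true),
          List.filter_cons_of_neg (by simp [hc])]
        exact ih d
      · have hstep : (if c == '.' then d
            else if d.contains c then d.modify c 0 (· + 1)
            else d.insert c 1) = d.modify c 0 (· + 1) := by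
          by_cases hk : d.contains c
          · simp [hc, hk]
          · have hk' : d.contains c = false := by simpa using hk
            simp [hc, hk', PySem.Dict.modify, PySem.Dict.getD_of_not_contains _ _ hk']
        rw [hstep, List.filter_cons_of_pos (by simp [hc]), List.foldl_cons]
        exact ih _

-- A's counting loop is countP, shifted by the accumulator
theorem pv_foldl_count (F : Int) (vs : List Int) (a : Int) :
    vs.foldl (fun r v => if v ≤ F then r + 1 else r) a
      = a + (vs.countP (fun v => v ≤ F) : Int) := by
  induction vs generalizing a with
  | nil => simp
  | cons v t ih =>
      simp only [List.foldl_cons, List.countP_cons, ih]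
      by_cases h : v ≤ F
      · simp [h]; ring
      · simp [h]

-- B's run scan on a sorted list counts the distinct characters of small multiplicity
theorem pv_countRuns_sorted (F : Int) (l : List Char) (hs : l.Pairwise (· ≤ ·)) :
    pvCountRuns F l = ((l.dedup.countP (fun c => decide ((l.count c : Int) ≤ F)) : Nat) : Int) := by
  induction l using pvCountRuns.induct with
  | case1 => simp [pvCountRuns]
  | case2 c rest ih =>
    set t := rest.takeWhile (fun x => x == c) with hT
    set dt := rest.dropWhile (fun x => x == c) with hD
    have hsplit : t ++ dt = rest := List.takeWhile_append_dropWhile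
    have ht : ∀ x ∈ t, x = c := by
      intro x hx
      have := List.mem_takeWhile_imp hx
      simpa using this.symm
    have hrest : ∀ x ∈ rest, c ≤ x := (List.pairwise_cons.mp hs).1
    have hsrest : rest.Pairwise (· ≤ ·) := (List.pairwise_cons.mp hs).2
    have hsdt : dt.Pairwise (· ≤ ·) := List.Pairwise.sublist (List.dropWhile_sublist _) hsrest
    have hlt : ∀ x ∈ dt, c < x := by
      cases hdt : dt with
      | nil => simp
      | cons d0 ds =>
        have hd0mem' : d0 ∈ dt := by rw [hdt]; exact List.mem_cons_self
        have hd0mem : d0 ∈ rest := (List.dropWhile_sublist _).mem (hD ▸ hd0mem')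
        have hd0ne : (d0 == c) = false := by
          have h2 := List.head?_dropWhile_not (fun x => x == c) rest
          rw [← hD, hdt] at h2
          simpa using h2
        have hcd0 : c < d0 := lt_of_le_of_ne (hrest _ hd0mem) (by simpa using (Ne.symm (by simpa using hd0ne)))
        intro x hx
        rcases List.mem_cons.mp hx with h | h
        · exact h ▸ hcd0
        · have : d0 ≤ x := by
            rw [hdt] at hsdt
            exact (List.pairwise_cons.mp hsdt).1 x h
          exact lt_of_lt_of_le hcd0 this
    have hnotmem : c ∉ dt := fun h => lt_irrefl c (hlt c h)
    have hcount_dt : dt.count c = 0 := List.count_eq_zero.mpr hnotmem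
    have hcount_t : t.count c = t.length := List.count_eq_length.mpr (fun b hb => (ht b hb).symm)
    have hcount_c : (c :: rest).count c = 1 + t.length := by
      rw [← hsplit, List.count_cons_self, List.count_append, hcount_t, hcount_dt]
      omega
    have hcount_x : ∀ x, x ≠ c → (c :: rest).count x = dt.count x := by
      intro x hx
      have hxt : t.count x = 0 := List.count_eq_zero.mpr (fun h => hx (ht x h))
      rw [← hsplit]
      simp [List.count_append, hxt, Ne.symm hx]
    -- the dedup of the whole list is, up to permutation, c :: the dedup of the strict tail
    have hperm : (c :: rest).dedup.Perm (c :: dt.dedup) := by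
      rw [List.perm_ext_iff_of_nodup (List.nodup_dedup _) (by
        simp only [List.nodup_cons]
        exact ⟨fun h => hnotmem (List.mem_dedup.mp h), List.nodup_dedup _⟩)]
      intro a
      simp only [List.mem_dedup, List.mem_cons]
      constructor
      · rintro (h | h)
        · exact Or.inl h
        · rw [← hsplit] at h
          rcases List.mem_append.mp h with h | h
          · exact Or.inl (ht a h)
          · exact Or.inr h
      · rintro (h | h)
        · exact Or.inl h
        · exact Or.inr (by rw [← hsplit]; exact List.mem_append.mpr (Or.inr h))
    have ihs := ih hsdt
    have hcongr : dt.dedup.countP (fun x => decide (((c :: rest).count x : Int) ≤ F))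
        = dt.dedup.countP (fun x => decide ((dt.count x : Int) ≤ F)) := by
      apply List.countP_congr
      intro x hx
      have hxc : x ≠ c := fun h => hnotmem (h ▸ List.mem_dedup.mp hx)
      rw [hcount_x x hxc]
    rw [pvCountRuns, ← hT, ← hD, hperm.countP_eq, List.countP_cons, hcongr, ihs, hcount_c]
    push_cast
    by_cases h : (1 : Int) + t.length ≤ F
    · simp [h]; omega
    · simp [h]

-- ===== VERDICT (by name: the statement is the Claim_ definition above) =====
theorem score_count_spec : Claim_equal_score_count := by
  intro key_matrix fingers _
  unfold Spec_score_count score_count score_count_alt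
  dsimp only
  set fl := key_matrix.toList.filter (fun c => c != '.') with hfl
  set srt := PySem.List.sorted fl (fun c => c) false with hsrt
  have hsortperm : srt.Perm fl := PySem.List.sorted_perm fl (fun c => c) false
  -- A's side: countP over the distinct filtered chars
  rw [pv_fold_eq_counter, ← hfl,
    PySem.Dict.values_eq_map_keys _ (PySem.Dict.nodup_keys_counter fl) 0,
    PySem.Dict.keys_counter, pv_foldl_count]
  have hmapcongr : (PySem.Set.ofList fl).map (fun k => (PySem.Dict.counter fl).getD k 0)
      = (PySem.Set.ofList fl).map (fun k => ((fl.count k : Nat) : Int)) := by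
    apply List.map_congr_left
    intro k _
    exact PySem.Dict.getD_counter fl k
  rw [hmapcongr, List.countP_map]
  -- B's side: run scan of the sorted filtered chars
  have hBs : pvCountRuns (fingers * 2) srt
      = ((srt.dedup.countP (fun c => decide ((srt.count c : Int) ≤ fingers * 2)) : Nat) : Int) := by
    apply pv_countRuns_sorted
    simpa using PySem.List.sorted_pairwise fl (fun c => c)
  rw [hBs]
  -- the two countP's range over nodup lists of the same distinct chars with the same predicate
  have hpermsets : srt.dedup.Perm (PySem.Set.ofList fl) := by
    rw [List.perm_ext_iff_of_nodup (List.nodup_dedup _) (PySem.Set.nodup_ofList fl)]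
    intro a
    rw [List.mem_dedup, PySem.Set.mem_ofList, hsortperm.mem_iff]
  have hpredeq : srt.dedup.countP (fun c => decide ((srt.count c : Int) ≤ fingers * 2))
      = (PySem.Set.ofList fl).countP (fun c => decide ((fl.count c : Int) ≤ fingers * 2)) := by
    rw [hpermsets.countP_eq]
    apply List.countP_congr
    intro x _
    rw [hsortperm.count_eq]
  rw [hpredeq]
  rw [zero_add]
  rfl
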